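-- pv_equiv track=rewrite | github.com/Henri-programer/Suspected_duplicate_names | Python_scripts/possible_duplicate_names.py | one_extra_word
-- ===== SOURCE A (Python) =====
-- def one_extra_word(words_1, words_2):
--     if abs(len(words_1) - len(words_2)) != 1:
--         return False
--
--     if len(words_1) > len(words_2):
--         longer, shorter = words_1, words_2
--     else:
--         longer, shorter = words_2, words_1
--
--     for k in range(len(longer)):
--         longer_without_k = longer[:k] + longer[k + 1:]
--
--         if longer_without_k == shorter:
--             return True
--
--     return False
-- ===== SOURCE B (Python) =====
-- def one_extra_word(words_1, words_2):
--     if abs(len(words_1) - len(words_2)) != 1: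
--         return False
--
--     if len(words_1) > len(words_2):
--         longer, shorter = words_1, words_2
--     else:
--         longer, shorter = words_2, words_1
--
--     # two pointers: skip the common prefix, then the single extra word must
--     # be at the first mismatch position
--     i = 0
--     n = len(shorter)
--     while i < n and longer[i] == shorter[i]:
--         i += 1
--     return longer[i + 1:] == shorter[i:]
-- ===== Notes on version B (the rewrite author's own statement) =====
-- stated objective: alternative
-- what changed: Replaced the try-every-deletion loop (each iteration rebuilds a copy of the longer list without index k and compares it whole) by a single two-pointer pass: advance past the common prefix, then compare the remaining suffixes once.
import Mathlib
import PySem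

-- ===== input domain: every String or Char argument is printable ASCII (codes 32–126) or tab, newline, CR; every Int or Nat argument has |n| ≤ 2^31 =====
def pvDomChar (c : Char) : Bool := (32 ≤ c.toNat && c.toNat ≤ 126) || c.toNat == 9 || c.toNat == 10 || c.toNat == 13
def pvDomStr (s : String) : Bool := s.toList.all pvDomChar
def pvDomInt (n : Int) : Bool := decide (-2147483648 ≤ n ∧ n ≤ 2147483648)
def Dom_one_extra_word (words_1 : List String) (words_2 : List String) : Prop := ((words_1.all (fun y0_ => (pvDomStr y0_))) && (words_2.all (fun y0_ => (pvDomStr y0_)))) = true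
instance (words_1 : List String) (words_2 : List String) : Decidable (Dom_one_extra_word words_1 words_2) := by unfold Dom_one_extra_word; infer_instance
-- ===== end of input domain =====

-- B replaces A's delete-one-and-compare loop by a single two-pointer pass over the common prefix (alternative algorithm).


-- ===== PORT A =====
-- the for-loop with early 'return True': recursion over the remaining range elements
def oewLoop (longer shorter : List String) : List Int → Bool
  | [] => false
  | k :: ks =>
      if (PySem.List.slice longer none (some k) ++ PySem.List.slice longer (some (k + 1)) none) = shorter
      then true
      else oewLoop longer shorter ks

def one_extra_word (words_1 : List String) (words_2 : List String) : Bool :=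
  if ((words_1.length : Int) - (words_2.length : Int)).natAbs ≠ 1 then false
  else
    if words_1.length > words_2.length then
      oewLoop words_1 words_2 (PySem.List.pyRange 0 (words_1.length : Int) 1)
    else
      oewLoop words_2 words_1 (PySem.List.pyRange 0 (words_2.length : Int) 1)

-- ===== PORT B =====
-- the while-loop advancing i past the common prefix, then the final suffix comparison
def oewSkip : List String → List String → Bool
  | l, [] => decide (l.drop 1 = ([] : List String))      -- i = len(shorter): longer[i+1:] == []
  | [], _ :: _ => false                                  -- unreachable when longer is the longer list
  | x :: ls, y :: ss => if x = y then oewSkip ls ss else decide (ls = y :: ss)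

def one_extra_word_alt (words_1 : List String) (words_2 : List String) : Bool :=
  if ((words_1.length : Int) - (words_2.length : Int)).natAbs ≠ 1 then false
  else
    if words_1.length > words_2.length then oewSkip words_1 words_2
    else oewSkip words_2 words_1

-- ===== PRECONDITION & SPEC =====
def Spec_one_extra_word (words_1 : List String) (words_2 : List String) (out : Bool) : Prop := out = one_extra_word_alt words_1 words_2
instance (words_1 : List String) (words_2 : List String) (out : Bool) : Decidable (Spec_one_extra_word words_1 words_2 out) := by unfold Spec_one_extra_word; infer_instance

-- ===== CLAIM (what is proved, stated in full; the proofs are below) =====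
def Claim_equal_one_extra_word : Prop := ∀ (words_1 : List String) (words_2 : List String), Dom_one_extra_word words_1 words_2 → Spec_one_extra_word words_1 words_2 (one_extra_word words_1 words_2)

-- ===== LEMMAS AND PROOFS =====

theorem oewLoop_eq_true_iff (l s : List String) (ks : List Int) :
    oewLoop l s ks = true ↔
      ∃ k ∈ ks, (PySem.List.slice l none (some k) ++ PySem.List.slice l (some (k + 1)) none) = s := by
  induction ks with
  | nil => simp [oewLoop]
  | cons k ks ih =>
      simp only [oewLoop]
      split_ifs with h
      · simp [h]
      · simp only [ih, List.mem_cons]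
        constructor
        · rintro ⟨j, hj, hjs⟩; exact ⟨j, Or.inr hj, hjs⟩
        · rintro ⟨j, hj | hj, hjs⟩
          · exact absurd (hj ▸ hjs) h
          · exact ⟨j, hj, hjs⟩

theorem oewSkip_iff (l s : List String) (hlen : l.length = s.length + 1) :
    oewSkip l s = true ↔ ∃ k < l.length, l.take k ++ l.drop (k + 1) = s := by
  induction l generalizing s with
  | nil => simp at hlen
  | cons x ls ih =>
      cases s with
      | nil =>
          have hls : ls = [] := List.eq_nil_of_length_eq_zero (by simpa using hlen)
          subst hls
          simp [oewSkip]
      | cons y ss =>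
          have hlen' : ls.length = ss.length + 1 := by simpa using hlen
          by_cases hx : x = y
          · simp only [oewSkip, if_pos hx, ih ss hlen']
            constructor
            · rintro ⟨j, hj, hjs⟩
              exact ⟨j + 1, by simpa using Nat.succ_lt_succ hj,
                by simp [List.take_succ_cons, List.drop_succ_cons, hjs, hx]⟩
            · rintro ⟨k, hk, hks⟩
              cases k with
              | zero =>
                  simp only [List.take_zero, List.nil_append, List.drop_succ_cons, List.drop_zero] at hks
                  subst hks
                  exact ⟨0, by simp, by simp⟩
              | succ j =>
                  simp only [List.take_succ_cons, List.drop_succ_cons, List.cons_append,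
                    List.cons.injEq] at hks
                  exact ⟨j, by simpa using Nat.lt_of_succ_lt_succ hk, hks.2⟩
          · simp only [oewSkip, if_neg hx, decide_eq_true_eq]
            constructor
            · intro h
              exact ⟨0, by simp, by simpa using h⟩
            · rintro ⟨k, hk, hks⟩
              cases k with
              | zero => simpa using hks
              | succ j =>
                  simp only [List.take_succ_cons, List.drop_succ_cons, List.cons_append,
                    List.cons.injEq] at hks
                  exact absurd hks.1 hx

theorem oewLoop_eq_oewSkip (l s : List String) (hlen : l.length = s.length + 1) :
    oewLoop l s (PySem.List.pyRange 0 (l.length : Int) 1) = oewSkip l s := by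
  rw [Bool.eq_iff_iff, oewLoop_eq_true_iff, oewSkip_iff l s hlen]
  constructor
  · rintro ⟨k, hk, hks⟩
    rw [PySem.List.mem_pyRange_one] at hk
    obtain ⟨hk0, hkl⟩ := hk
    refine ⟨k.toNat, by omega, ?_⟩
    rw [PySem.List.slice_to l hk0, PySem.List.slice_from l (by omega : (0:Int) ≤ k + 1)] at hks
    have h2 : (k + 1).toNat = k.toNat + 1 := by omega
    rwa [h2] at hks
  · rintro ⟨k, hk, hks⟩
    refine ⟨(k : Int), PySem.List.mem_pyRange_one.mpr ⟨by omega, by exact_mod_cast hk⟩, ?_⟩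
    rw [PySem.List.slice_to l (by omega : (0:Int) ≤ (k:Int)), PySem.List.slice_from l (by omega : (0:Int) ≤ (k:Int) + 1)]
    have h1 : ((k : Int)).toNat = k := by omega
    have h2 : ((k : Int) + 1).toNat = k + 1 := by omega
    rw [h1, h2, hks]

-- ===== VERDICT (by name: the statement is the Claim_ definition above) =====
theorem one_extra_word_spec : Claim_equal_one_extra_word := by
  intro w1 w2 _
  unfold Spec_one_extra_word one_extra_word one_extra_word_alt
  split_ifs with hd hg
  · rfl
  · exact oewLoop_eq_oewSkip w1 w2 (by omega)
  · exact oewLoop_eq_oewSkip w2 w1 (by omega)
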